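-- pv_equiv track=rewrite | github.com/SternLabTAU/SternLab | Candida_Positive_Selection/create_SNP_sequence.py | valid_line
-- ===== SOURCE A (Python) =====
-- def valid_line(lst):
--     """
--     Recives a list of all the letters in a specific SNP and decided if it should be included.
--     If all the letters in all the samples are the same - return False
--     If one of the letters is not leagal ("N,N" etc) - retrun False
--     Else, return True
--     """
--     identical = True
--     for letter in lst[1:]:
--         if len(letter) != 1 and letter != "":
--             return False
--         elif letter != lst[1] and letter != "":
--             identical = False
--     if identical:
--         return False
--     else:
--         return True
-- ===== SOURCE B (Python) =====
-- def valid_line(lst):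
--     rest = lst[1:]
--     if not rest:
--         return False
--     if any(len(l) > 1 for l in rest):
--         return False
--     joined = ''.join(rest)
--     return joined != rest[0] * len(joined)
-- ===== Notes on version B (the rewrite author's own statement) =====
-- stated objective: alternative
-- what changed: Replaces A's flag-threaded early-returning loop with a string-flattening formulation: after rejecting any multi-character letter, concatenate the tail into one string and answer by comparing it with the reference letter lst[1] replicated to the same length.
import Mathlib
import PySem

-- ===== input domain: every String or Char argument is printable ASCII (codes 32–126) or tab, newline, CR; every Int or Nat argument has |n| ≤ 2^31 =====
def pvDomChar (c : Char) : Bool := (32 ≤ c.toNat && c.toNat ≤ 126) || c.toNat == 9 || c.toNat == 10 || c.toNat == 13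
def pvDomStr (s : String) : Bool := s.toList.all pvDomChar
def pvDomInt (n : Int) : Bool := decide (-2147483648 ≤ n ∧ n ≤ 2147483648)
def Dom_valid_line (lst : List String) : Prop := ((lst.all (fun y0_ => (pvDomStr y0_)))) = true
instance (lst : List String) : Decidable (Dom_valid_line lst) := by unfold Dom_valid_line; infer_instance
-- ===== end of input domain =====

-- B flattens the tail into one string and compares it with the reference letter replicated; objective: an alternative formulation of the same cost.


-- ===== PORT A =====
-- the loop over lst[1:]: `identical` flag threaded through, early return False on an illegal letter
def validLineLoop (ref : String) (identical : Bool) : List String → Bool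
  | [] => if identical then false else true
  | letter :: rest =>
      if PySem.Str.len letter ≠ 1 ∧ letter ≠ "" then false
      else if letter ≠ ref ∧ letter ≠ "" then validLineLoop ref false rest
      else validLineLoop ref identical rest

def valid_line (lst : List String) : Bool :=
  -- lst[1] is only read inside the loop, where lst[1:] is nonempty, so pyGetD's default is never the value used
  validLineLoop (PySem.List.pyGetD lst 1 "") true (PySem.List.slice lst (some 1) none)

-- ===== PORT B =====
-- `rest = lst[1:]`: empty → False; an over-long letter → False; else compare the
-- concatenation of rest with the reference letter rest[0] replicated to its length
def valid_line_alt_body : List String → Bool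
  | [] => false
  | r0 :: rest' =>
      if (r0 :: rest').any (fun l => decide (PySem.Str.len l > 1)) then false
      else
        let joined : List Char := PySem.Chars.join [] ((r0 :: rest').map String.toList)
        decide (joined ≠ PySem.List.pyRepeat r0.toList (joined.length : Int))

def valid_line_alt (lst : List String) : Bool :=
  valid_line_alt_body (PySem.List.slice lst (some 1) none)

-- ===== PRECONDITION & SPEC =====
def Spec_valid_line (lst : List String) (out : Bool) : Prop := out = valid_line_alt lst
instance (lst : List String) (out : Bool) : Decidable (Spec_valid_line lst out) := by unfold Spec_valid_line; infer_instance

-- ===== CLAIM (what is proved, stated in full; the proofs are below) =====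
def Claim_equal_valid_line : Prop := ∀ (lst : List String), Dom_valid_line lst → Spec_valid_line lst (valid_line lst)

-- ===== LEMMAS AND PROOFS =====

-- closed form of A's loop: every letter legal, and the flag dies iff some non-empty letter differs from ref
lemma validLineLoop_eq (ref : String) (id : Bool) (xs : List String) :
    validLineLoop ref id xs
      = ((xs.all fun l => PySem.Str.len l == 1 || l == "")
         && (!id || xs.any fun l => l != ref && l != "")) := by
  induction xs generalizing id with
  | nil => cases id <;> simp [validLineLoop]
  | cons letter rest ih =>
      rw [validLineLoop, List.all_cons, List.any_cons]
      split_ifs with h1 h2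
      · have hp : (PySem.Str.len letter == 1 || letter == "") = false := by
          simp only [Bool.or_eq_false_iff, beq_eq_false_iff_ne]
          exact ⟨h1.1, h1.2⟩
        rw [hp]; simp
      · have hq : (letter != ref && letter != "") = true := by
          simp only [Bool.and_eq_true, bne_iff_ne]
          exact ⟨h2.1, h2.2⟩
        have hlen : PySem.Str.len letter = 1 := by
          by_contra hc; exact not_and.mp h1 hc h2.2
        have hp : (PySem.Str.len letter == 1 || letter == "") = true := by
          simp only [Bool.or_eq_true, beq_iff_eq]
          exact Or.inl hlen
        rw [ih, hp, hq]; simp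
      · have hp : (PySem.Str.len letter == 1 || letter == "") = true := by
          simp only [Bool.or_eq_true, beq_iff_eq]
          by_cases hn : letter = ""
          · exact Or.inr hn
          · exact Or.inl (by by_contra hc; exact not_and.mp h1 hc hn)
        have hq : (letter != ref && letter != "") = false := by
          rcases not_and_or.mp h2 with h' | h' <;> rw [not_not.mp h'] <;> simp
        rw [ih, hp, hq]; simp

-- lst[1] equals the head of lst[1:] whenever lst[1:] is nonempty
lemma pyGetD_one_eq_head (lst : List String) (r0 : String) (rest' : List String)
    (h : PySem.List.slice lst (some 1) none = r0 :: rest') :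
    PySem.List.pyGetD lst 1 "" = r0 := by
  rcases lst with _ | ⟨a, tl⟩
  · simp [PySem.List.slice] at h
  · rw [PySem.List.slice_from_one] at h
    simp only [List.tail_cons] at h
    subst h
    simp [pysem]

-- ''.join with an empty separator is list flatten
lemma join_nil_eq_flatten (ls : List (List Char)) : PySem.Chars.join [] ls = ls.flatten := by
  induction ls with
  | nil => simp [PySem.Chars.join_nil]
  | cons a t ih =>
      cases t with
      | nil => simp [PySem.Chars.join_singleton]
      | cons b t' => rw [PySem.Chars.join_cons_cons]; simp [ih]

-- B's legality guard is the pointwise negation of A's legality scan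
lemma legal_pointwise (l : String) :
    (decide (PySem.Str.len l > 1)) = !((PySem.Str.len l == 1) || (l == "")) := by
  rw [PySem.Str.len_eq]
  have hemp : (l == "") = decide (l.toList.length = 0) := by
    by_cases hc : l = ""
    · subst hc; simp
    · have hn : l.toList ≠ [] := fun hn => hc (String.toList_inj.mp (by simp [hn]))
      simp [hc]
  rw [hemp]
  apply Bool.eq_iff_iff.mpr
  simp only [decide_eq_true_eq, Bool.not_eq_true', Bool.or_eq_false_iff,
    beq_eq_false_iff_ne, ne_eq, decide_eq_false_iff_not]
  omega

-- 'any (not p)' is 'not (all p)'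
lemma any_not_eq_not_all (xs : List String) (p : String → Bool) :
    xs.any (fun l => !p l) = !xs.all p := by
  induction xs with
  | nil => simp
  | cons a t ih => cases h : p a <;> simp [List.any_cons, List.all_cons, h, ih]

-- B's replicate comparison, in the legal case, is A's `identical` scan
lemma repeat_ne_eq_any (r0 : String) (rest' : List String)
    (hleg : ∀ l ∈ r0 :: rest', l.toList.length ≤ 1) :
    (decide ((r0.toList :: List.map String.toList rest').flatten
        ≠ PySem.List.pyRepeat r0.toList
            (((r0.toList :: List.map String.toList rest').flatten.length : Nat) : Int)))
      = (r0 :: rest').any (fun l => l != r0 && l != "") := by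
  set joined := (r0.toList :: List.map String.toList rest').flatten with hj
  apply Bool.eq_iff_iff.mpr
  simp only [decide_eq_true_eq, List.any_eq_true, Bool.and_eq_true, bne_iff_ne]
  have hmem : ∀ ch : Char, ch ∈ joined ↔ ∃ l ∈ r0 :: rest', ch ∈ l.toList := by
    intro ch
    simp [hj, List.mem_flatten, List.mem_cons, List.mem_map]
  have hsingle : ∀ l ∈ r0 :: rest', l ≠ "" → ∃ d, l.toList = [d] := by
    intro l hl hne
    rcases h : l.toList with _ | ⟨d, ds⟩
    · exact absurd (String.toList_inj.mp (by simp [h])) hne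
    · have := hleg l hl; rw [h] at this; simp at this
      exact ⟨d, by simp [this]⟩
  rcases h0 : r0.toList with _ | ⟨c, cs⟩
  · -- reference letter is empty: repeat is [], so "differs" iff some letter is non-empty
    have hr0 : r0 = "" := String.toList_inj.mp (by simp [h0])
    have hrep : PySem.List.pyRepeat ([] : List Char) ((joined.length : Nat) : Int) = [] := by
      simp [PySem.List.pyRepeat]
    rw [hrep]
    constructor
    · intro hne
      rcases List.exists_mem_of_ne_nil joined hne with ⟨ch, hch⟩
      rcases (hmem ch).mp hch with ⟨l, hl, hchl⟩
      have hlne : l ≠ "" := by intro he; subst he; simp at hchl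
      exact ⟨l, hl, by rw [hr0]; exact hlne, hlne⟩
    · rintro ⟨l, hl, _, hne⟩ heq
      rcases hsingle l hl hne with ⟨d, hd⟩
      have : d ∈ joined := (hmem d).mpr ⟨l, hl, by simp [hd]⟩
      rw [heq] at this; simp at this
  · -- reference letter is a single char c: repeat is replicate, "differs" iff some char ≠ c
    have hcs : cs = [] := by
      have := hleg r0 (by simp); rw [h0] at this; simp at this; exact this
    subst hcs
    rw [PySem.List.pyRepeat_singleton]
    simp only [Int.toNat_natCast]
    constructor
    · intro hne
      have : ¬ ∀ b ∈ joined, b = c := by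
        intro hall; exact hne (List.eq_replicate_iff.mpr ⟨rfl, hall⟩)
      push Not at this
      rcases this with ⟨ch, hch, hchc⟩
      rcases (hmem ch).mp hch with ⟨l, hl, hchl⟩
      have hlne : l ≠ "" := by intro he; subst he; simp at hchl
      refine ⟨l, hl, ?_, hlne⟩
      intro he; subst he
      rw [h0] at hchl; simp at hchl; exact hchc hchl
    · rintro ⟨l, hl, hlr, hlne⟩ heq
      rcases hsingle l hl hlne with ⟨d, hd⟩
      have hdc : d ≠ c := by
        intro he; subst he
        exact hlr (String.toList_inj.mp (by rw [hd, h0]))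
      have hdj : d ∈ joined := (hmem d).mpr ⟨l, hl, by simp [hd]⟩
      rw [heq] at hdj
      exact hdc (List.eq_of_mem_replicate hdj)

theorem valid_line_spec : Claim_equal_valid_line := by
  intro lst _
  unfold Spec_valid_line valid_line valid_line_alt
  rcases h : PySem.List.slice lst (some 1) none with _ | ⟨r0, rest'⟩
  · simp [validLineLoop, valid_line_alt_body]
  · rw [pyGetD_one_eq_head lst r0 rest' h, validLineLoop_eq]
    simp only [valid_line_alt_body, List.map_cons]
    have hfun : (fun l => decide (PySem.Str.len l > 1))
        = fun l => !((PySem.Str.len l == 1) || (l == "")) := funext legal_pointwise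
    rw [hfun, any_not_eq_not_all]
    cases hA : ((r0 :: rest').all fun l => PySem.Str.len l == 1 || l == "") with
    | false => simp
    | true =>
      simp only [Bool.not_true, Bool.false_eq_true, if_false, Bool.true_and, Bool.false_or]
      simp only [join_nil_eq_flatten]
      have hleg : ∀ l ∈ r0 :: rest', l.toList.length ≤ 1 := by
        intro l hl
        have := List.all_eq_true.mp hA l hl
        rcases Bool.or_eq_true_iff.mp this with h' | h'
        · have := beq_iff_eq.mp h'; rw [PySem.Str.len_eq] at this; omega
        · have : l = "" := beq_iff_eq.mp h'
          subst this; simp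
      rw [repeat_ne_eq_any r0 rest' hleg]
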